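-- pv_equiv track=rewrite | github.com/preddybreddy/Coding-Bat-Recursion-Solutions | coding_bat_recusions_1_solutions.py | changePi
-- ===== SOURCE A (Python) =====
-- def changePi(str):
--     if len(str) < 2:
--         return str
--
--     if str == 'pi':
--         return '3.14'
--
--     if str[:2] == 'pi':
--         return '3.14' + changePi(str[2:])
--
--     return str[0] + changePi(str[1:])
-- ===== SOURCE B (Python) =====
-- def changePi(str):
--     res = []
--     i = 0
--     n = len(str)
--     while i < n:
--         if str[i:i+2] == 'pi':
--             res.append('3.14')
--             i += 2
--         else:
--             res.append(str[i])
--             i += 1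
--     return ''.join(res)
-- ===== Notes on version B (the rewrite author's own statement) =====
-- stated objective: alternative
-- what changed: Replaces the tail recursion (with special-case guards for short strings and for str == 'pi') by a single iterative index-driven pass that appends pieces to an accumulator and joins them.
import Mathlib
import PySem

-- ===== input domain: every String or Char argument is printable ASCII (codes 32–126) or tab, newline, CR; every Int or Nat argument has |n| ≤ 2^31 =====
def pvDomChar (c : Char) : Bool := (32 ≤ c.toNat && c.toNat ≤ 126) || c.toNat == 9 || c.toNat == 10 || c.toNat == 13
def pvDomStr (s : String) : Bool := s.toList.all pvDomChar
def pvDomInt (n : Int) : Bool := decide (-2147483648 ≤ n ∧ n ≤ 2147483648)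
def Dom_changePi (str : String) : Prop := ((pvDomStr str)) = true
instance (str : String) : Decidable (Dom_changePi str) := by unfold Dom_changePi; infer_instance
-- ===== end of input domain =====

-- B replaces A's tail recursion by a single iterative index-driven pass with an accumulator (alternative decomposition, same values).

-- ===== PORT A =====
-- A's recursion, transliterated over the character list of the string:
-- len(str) < 2 → return str; str == 'pi' → '3.14'; str[:2] == 'pi' → '3.14' + rec(str[2:]); else str[0] + rec(str[1:])
def changePiA : List Char → List Char
  | [] => []
  | [c] => [c]
  | c1 :: c2 :: rest =>
    if c1 :: c2 :: rest = ['p', 'i'] then ['3', '.', '1', '4']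
    else if (c1 :: c2 :: rest).take 2 = ['p', 'i'] then ['3', '.', '1', '4'] ++ changePiA rest
    else c1 :: changePiA (c2 :: rest)

def changePi (str : String) : String := String.ofList (changePiA str.toList)

-- ===== PORT B =====
-- B's while loop: i scans the string, res accumulates string pieces, joined at the end.
-- str[i:i+2] with 0 ≤ i is exactly (s.drop i).take 2; s[i] is in range since i < s.length.
def changePiBLoop : Nat → List Char → Nat → List (List Char) → List Char
  | 0, _, _, res => res.flatten
  | fuel + 1, s, i, res =>
    if i < s.length then
      if (s.drop i).take 2 = ['p', 'i'] then
        changePiBLoop fuel s (i + 2) (res ++ [['3', '.', '1', '4']])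
      else
        changePiBLoop fuel s (i + 1) (res ++ [[s[i]!]])
    else
      res.flatten

def changePi_alt (str : String) : String := String.ofList (changePiBLoop str.toList.length str.toList 0 [])

-- ===== PRECONDITION & SPEC =====
def Spec_changePi (str : String) (out : String) : Prop := out = changePi_alt str
instance (str : String) (out : String) : Decidable (Spec_changePi str out) := by unfold Spec_changePi; infer_instance

-- ===== CLAIM (what is proved, stated in full; the proofs are below) =====
def Claim_equal_changePi : Prop := ∀ (str : String), Dom_changePi str → Spec_changePi str (changePi str)

-- ===== LEMMAS AND PROOFS =====

theorem changePiA_nil : changePiA [] = [] := rfl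

theorem changePiBLoop_eq (s : List Char) :
    ∀ (fuel i : Nat) (res : List (List Char)), s.length - i ≤ fuel →
      changePiBLoop fuel s i res = res.flatten ++ changePiA (s.drop i) := by
  intro fuel
  induction fuel with
  | zero =>
    intro i res hn
    have hge : s.length ≤ i := by omega
    simp [changePiBLoop, List.drop_eq_nil_of_le hge, changePiA_nil]
  | succ n ih =>
    intro i res hn
    rw [changePiBLoop]
    by_cases h : i < s.length
    · have hne : s.drop i ≠ [] := by
        intro hnil
        have := List.drop_eq_nil_iff.mp hnil
        omega
      obtain ⟨c, t, hdrop⟩ := List.exists_cons_of_ne_nil hne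
      have hc : s[i]! = c := by
        rw [getElem!_pos s i h]
        have h0 : (s.drop i)[0]'(by simp [hdrop]) = c := by simp [hdrop]
        simpa using h0
      have hd1 : s.drop (i + 1) = t := by
        have : s.drop (i + 1) = (s.drop i).drop 1 := by
          rw [List.drop_drop]
        rw [this, hdrop]; rfl
      cases t with
      | nil =>
        have htake : (s.drop i).take 2 ≠ ['p', 'i'] := by simp [hdrop]
        simp only [h, if_pos, htake]
        rw [ih (i + 1) (res ++ [[s[i]!]]) (by omega)]
        simp [hd1, hdrop, hc, changePiA]
      | cons c2 rest =>
        have hd2 : s.drop (i + 2) = rest := by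
          have : s.drop (i + 2) = (s.drop i).drop 2 := by
            rw [List.drop_drop]
          rw [this, hdrop]; rfl
        by_cases hpi : c = 'p' ∧ c2 = 'i'
        · obtain ⟨hp, hi2⟩ := hpi
          have htake : (s.drop i).take 2 = ['p', 'i'] := by simp [hdrop, hp, hi2]
          simp only [h, if_pos, htake]
          rw [ih (i + 2) (res ++ [['3', '.', '1', '4']]) (by omega)]
          rw [hd2, hdrop, hp, hi2]
          cases rest with
          | nil => simp [changePiA]
          | cons d ds => simp [changePiA]
        · have htake : (s.drop i).take 2 ≠ ['p', 'i'] := by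
            simp [hdrop]
            intro hp hi2
            exact absurd ⟨hp, hi2⟩ hpi
          simp only [h, if_pos, htake]
          rw [ih (i + 1) (res ++ [[s[i]!]]) (by omega)]
          rw [hd1, hdrop, hc]
          have hA : changePiA (c :: c2 :: rest) = c :: changePiA (c2 :: rest) := by
            have h1 : c :: c2 :: rest ≠ ['p', 'i'] := by
              intro he
              injection he with e1 e2; injection e2 with e2 _
              exact hpi ⟨e1, e2⟩
            have h2 : (c :: c2 :: rest).take 2 ≠ ['p', 'i'] := by
              simp
              intro hp hi2
              exact absurd ⟨hp, hi2⟩ hpi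
            simp only [changePiA]
            rw [if_neg h1, if_neg h2]
          rw [hA]; simp
    · have hge : s.length ≤ i := by omega
      simp [h, List.drop_eq_nil_of_le hge, changePiA_nil]

-- ===== VERDICT (by name: the statement is the Claim_ definition above) =====
theorem changePi_spec : Claim_equal_changePi := by
  intro str _
  unfold Spec_changePi changePi changePi_alt
  rw [changePiBLoop_eq str.toList str.toList.length 0 [] (by omega)]
  simp
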